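-- pv_equiv track=rewrite | github.com/KoicsD/pythondojo | weakest_point.py | weak_point
-- ===== SOURCE A (Python) =====
-- def weak_point(matrix):
--     min = sum(matrix[0])
--     weakest_row_index = 0
--     for row_index in range(1, len(matrix)):
--         row_sum = sum(matrix[row_index])
--         if row_sum < min:
--             min = row_sum
--             weakest_row_index = row_index
--
--     min = sum(get_column_by_index(matrix, 0))
--     weakest_column_index = 0
--     for column_index in range(1, len(matrix[0])):
--         column_sum = sum(get_column_by_index(matrix, column_index))
--         if column_sum < min:
--             min = column_sum
--             weakest_column_index = column_index
--     return weakest_row_index, weakest_column_index  # [0, 0]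
--
-- def get_column_by_index(matrix, column_index):
--     return [matrix[i][column_index] for i in range(len(matrix))]
-- ===== SOURCE B (Python) =====
-- def weak_point(matrix):
--     width = len(matrix[0])
--     col_sums = [0] * width
--     row_sums = []
--     for row in matrix:
--         row_sums.append(sum(row))
--         col_sums = [col_sums[j] + row[j] for j in range(width)]
--     return _first_argmin(row_sums), _first_argmin(col_sums)
--
-- def _first_argmin(xs):
--     best_i, best_v = 0, xs[0]
--     for i in range(1, len(xs)):
--         if xs[i] < best_v:
--             best_i, best_v = i, xs[i]
--     return best_i
-- ===== Notes on version B (the rewrite author's own statement) =====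
-- stated objective: alternative
-- what changed: One nested pass builds row_sums and col_sums simultaneously (no per-column re-scan via get_column_by_index), then a shared first-argmin helper picks both indices; A instead runs two separate min-tracking loops, rebuilding each column as a fresh list.
import Mathlib
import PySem

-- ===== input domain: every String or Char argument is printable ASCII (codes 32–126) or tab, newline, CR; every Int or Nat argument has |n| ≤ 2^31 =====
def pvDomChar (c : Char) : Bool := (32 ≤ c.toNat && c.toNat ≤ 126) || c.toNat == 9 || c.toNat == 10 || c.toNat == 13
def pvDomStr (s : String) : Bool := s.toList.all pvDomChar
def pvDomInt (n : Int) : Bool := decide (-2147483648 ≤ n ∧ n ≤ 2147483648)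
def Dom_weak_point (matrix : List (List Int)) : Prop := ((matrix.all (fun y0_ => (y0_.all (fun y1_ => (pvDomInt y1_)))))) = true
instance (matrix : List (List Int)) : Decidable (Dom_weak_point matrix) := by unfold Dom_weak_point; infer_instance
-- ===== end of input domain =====

-- B does one nested pass building row_sums and col_sums together, then a shared
-- first-argmin helper; A runs two separate min-tracking loops rebuilding each column.

-- ===== PORT A =====
def pv_get_column_by_index (matrix : List (List Int)) (column_index : Int) : List Int :=
  (PySem.List.pyRange 0 matrix.length 1).map
    (fun i => PySem.List.pyGetD (PySem.List.pyGetD matrix i []) column_index 0)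

def weak_point (matrix : List (List Int)) : Int × Int :=
  let rowSt := (PySem.List.pyRange 1 matrix.length 1).foldl
    (fun (st : Int × Int) ri =>
      let row_sum := (PySem.List.pyGetD matrix ri []).sum
      if row_sum < st.1 then (row_sum, ri) else st)
    ((PySem.List.pyGetD matrix 0 []).sum, 0)
  let colSt := (PySem.List.pyRange 1 ((PySem.List.pyGetD matrix 0 []).length : Int) 1).foldl
    (fun (st : Int × Int) ci =>
      let column_sum := (pv_get_column_by_index matrix ci).sum
      if column_sum < st.1 then (column_sum, ci) else st)
    ((pv_get_column_by_index matrix 0).sum, 0)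
  (rowSt.2, colSt.2)

-- ===== PORT B =====
def pv_first_argmin (xs : List Int) : Int :=
  ((PySem.List.pyRange 1 (xs.length : Int) 1).foldl
    (fun (st : Int × Int) i =>
      if PySem.List.pyGetD xs i 0 < st.2 then (i, PySem.List.pyGetD xs i 0) else st)
    (0, PySem.List.pyGetD xs 0 0)).1

def weak_point_alt (matrix : List (List Int)) : Int × Int :=
  let width := (PySem.List.pyGetD matrix 0 []).length
  let st := matrix.foldl
    (fun (st : List Int × List Int) row =>
      ((PySem.List.pyRange 0 (width : Int) 1).map
         (fun j => PySem.List.pyGetD st.1 j 0 + PySem.List.pyGetD row j 0),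
       st.2 ++ [row.sum]))
    (List.replicate width 0, ([] : List Int))
  (pv_first_argmin st.2, pv_first_argmin st.1)

-- ===== PRECONDITION & SPEC =====
-- Pre_ excludes exactly the inputs where Python A raises IndexError (and B raises too):
-- the empty matrix, a matrix whose first row is empty, and matrices with a row shorter
-- than the first row (so a column access goes out of range).
def Pre_weak_point (matrix : List (List Int)) : Prop :=
  matrix ≠ [] ∧ 1 ≤ (matrix.headD []).length ∧
    ∀ r ∈ matrix, (matrix.headD []).length ≤ r.length
instance (matrix : List (List Int)) : Decidable (Pre_weak_point matrix) := by
  unfold Pre_weak_point; infer_instance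

def pvWitness_weak_point : List (List Int) := [[1, 2], [3, 4]]

def Spec_weak_point (matrix : List (List Int)) (out : Int × Int) : Prop := out = weak_point_alt matrix
instance (matrix : List (List Int)) (out : Int × Int) : Decidable (Spec_weak_point matrix out) := by unfold Spec_weak_point; infer_instance

-- ===== CLAIM (what is proved, stated in full; the proofs are below) =====
def Claim_equal_weak_point : Prop := ∀ (matrix : List (List Int)), Dom_weak_point matrix → Pre_weak_point matrix → Spec_weak_point matrix (weak_point matrix)

-- ===== LEMMAS AND PROOFS =====

-- first-argmin state swap: A keeps (min, idx), B keeps (idx, min)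
theorem pv_swap_fold (l : List Int) (f : Int → Int) (a b : Int) :
    l.foldl (fun (st : Int × Int) i => if f i < st.2 then (i, f i) else st) (b, a)
      = ((l.foldl (fun (st : Int × Int) i => if f i < st.1 then (f i, i) else st) (a, b)).2,
         (l.foldl (fun (st : Int × Int) i => if f i < st.1 then (f i, i) else st) (a, b)).1) := by
  induction l generalizing a b with
  | nil => simp
  | cons x xs ih =>
    simp only [List.foldl_cons]
    by_cases h : f x < a <;> simp [h, ih]

-- the column-sum of column j (over all rows, defaulting out-of-range to 0)
def pv_colVal (matrix : List (List Int)) (j : Int) : Int :=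
  (matrix.map (fun row => PySem.List.pyGetD row j 0)).sum

theorem pv_col_eq (matrix : List (List Int)) (j : Int) :
    (pv_get_column_by_index matrix j).sum = pv_colVal matrix j := by
  unfold pv_get_column_by_index pv_colVal
  rw [show (fun i => PySem.List.pyGetD (PySem.List.pyGetD matrix i ([] : List Int)) j 0)
        = (fun row => PySem.List.pyGetD row j 0) ∘ (fun i => PySem.List.pyGetD matrix i []) from rfl,
      ← List.map_map, PySem.List.map_pyGetD_pyRange_zero']

-- B's nested column update, unrolled over the rows
theorem pv_colfold (w : Int) (l : List (List Int)) (g : Int → Int) :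
    l.foldl
      (fun (cs : List Int) row =>
        (PySem.List.pyRange 0 w 1).map
          (fun j => PySem.List.pyGetD cs j 0 + PySem.List.pyGetD row j 0))
      ((PySem.List.pyRange 0 w 1).map g)
      = (PySem.List.pyRange 0 w 1).map (fun j => g j + pv_colVal l j) := by
  induction l generalizing g with
  | nil => simp [pv_colVal]
  | cons r l ih =>
    simp only [List.foldl_cons]
    rw [show ((PySem.List.pyRange 0 w 1).map
          (fun j => PySem.List.pyGetD ((PySem.List.pyRange 0 w 1).map g) j 0 + PySem.List.pyGetD r j 0))
        = (PySem.List.pyRange 0 w 1).map (fun j => g j + PySem.List.pyGetD r j 0) from ?_, ih]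
    · apply List.map_congr_left
      intro j hj
      have hj' := (PySem.List.mem_pyRange_one).1 hj
      simp [pv_colVal, add_assoc]
    · apply List.map_congr_left
      intro j hj
      have hj' := (PySem.List.mem_pyRange_one).1 hj
      rw [PySem.List.pyGetD_map_pyRange_of_nonneg g w j 0 hj'.1 hj'.2]

theorem weak_point_spec_aux (matrix : List (List Int)) (h : Pre_weak_point matrix) :
    weak_point matrix = weak_point_alt matrix := by
  obtain ⟨hne, hw, hrows⟩ := h
  unfold weak_point weak_point_alt
  dsimp only
  -- split B's pair fold into the two independent accumulators
  rw [PySem.List.foldl_prod_mk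
        (f := fun (cs : List Int) (row : List Int) =>
          (PySem.List.pyRange 0 ((PySem.List.pyGetD matrix 0 []).length : Int) 1).map
            (fun j => PySem.List.pyGetD cs j 0 + PySem.List.pyGetD row j 0))
        (g := fun (rs : List Int) (row : List Int) => rs ++ [row.sum])]
  rw [PySem.List.foldl_append_singleton_eq_map, List.nil_append]
  have hrep : List.replicate (PySem.List.pyGetD matrix 0 []).length (0 : Int)
      = (PySem.List.pyRange 0 ((PySem.List.pyGetD matrix 0 []).length : Int) 1).map (fun _ => 0) := by
    rw [List.map_const', PySem.List.length_pyRange_one]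
    simp
  rw [hrep, pv_colfold]
  obtain ⟨r0, rest, rfl⟩ : ∃ r0 rest, matrix = r0 :: rest :=
    ⟨matrix.headD [], matrix.tail, by cases matrix <;> simp_all⟩
  simp only [List.headD_cons] at hw hrows ⊢
  have h0 : PySem.List.pyGetD (r0 :: rest) 0 ([] : List Int) = r0 := by
    simp [PySem.List.pyGetD_zero_cons]
  rw [h0]
  rw [Prod.mk.injEq]
  constructor
  -- rows
  · unfold pv_first_argmin
    have hval : ∀ (x : Int), PySem.List.pyGetD ((r0 :: rest).map List.sum) x 0
        = (PySem.List.pyGetD (r0 :: rest) x ([] : List Int)).sum := by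
      intro x
      simpa using PySem.List.pyGetD_map List.sum (r0 :: rest) x []
    rw [PySem.List.foldl_congr_mem (PySem.List.pyRange 1 ((r0 :: rest).length : Int) 1) _
        (fun (st : Int × Int) i =>
          if PySem.List.pyGetD ((r0 :: rest).map List.sum) i 0 < st.1
          then (PySem.List.pyGetD ((r0 :: rest).map List.sum) i 0, i) else st)
        ((r0.sum : Int), (0 : Int))
        (by intro acc x _; simp only [hval])]
    have h0' : PySem.List.pyGetD ((r0 :: rest).map List.sum) 0 0 = r0.sum := by
      simp [PySem.List.pyGetD_zero_cons]
    rw [h0', List.length_map,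
        pv_swap_fold (PySem.List.pyRange 1 ((r0 :: rest).length : Int) 1)
          (fun i => PySem.List.pyGetD ((r0 :: rest).map List.sum) i 0) r0.sum 0]
  -- columns
  · unfold pv_first_argmin
    rw [PySem.List.foldl_congr_mem (PySem.List.pyRange 1 (r0.length : Int) 1) _
        (fun (st : Int × Int) ci =>
          if pv_colVal (r0 :: rest) ci < st.1 then (pv_colVal (r0 :: rest) ci, ci) else st)
        ((pv_get_column_by_index (r0 :: rest) 0).sum, (0 : Int))
        (by intro acc x _; simp only [pv_col_eq])]
    rw [pv_col_eq]
    have hlen : ((PySem.List.pyRange 0 (r0.length : Int) 1).map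
        (fun j => (0 : Int) + pv_colVal (r0 :: rest) j)).length = r0.length := by
      rw [List.length_map, PySem.List.length_pyRange_one]; simp
    rw [hlen]
    rw [PySem.List.foldl_congr_mem (PySem.List.pyRange 1 (r0.length : Int) 1) _
        (fun (st : Int × Int) i =>
          if pv_colVal (r0 :: rest) i < st.2 then (i, pv_colVal (r0 :: rest) i) else st)
        ((0 : Int), PySem.List.pyGetD ((PySem.List.pyRange 0 (r0.length : Int) 1).map
          (fun j => (0 : Int) + pv_colVal (r0 :: rest) j)) 0 0)
        (by
          intro acc x hx
          have hx' := (PySem.List.mem_pyRange_one).1 hx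
          simp only [PySem.List.pyGetD_map_pyRange_of_nonneg _ _ _ _ (by omega : (0:Int) ≤ x) hx'.2,
            zero_add])]
    have hg0 : PySem.List.pyGetD ((PySem.List.pyRange 0 (r0.length : Int) 1).map
        (fun j => (0 : Int) + pv_colVal (r0 :: rest) j)) 0 0 = pv_colVal (r0 :: rest) 0 := by
      rw [PySem.List.pyGetD_map_pyRange_of_nonneg _ _ _ _ le_rfl (by exact_mod_cast hw), zero_add]
    rw [hg0, pv_swap_fold (PySem.List.pyRange 1 (r0.length : Int) 1)
        (pv_colVal (r0 :: rest)) (pv_colVal (r0 :: rest) 0) 0]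

-- ===== VERDICT (by name: the statement is the Claim_ definition above) =====
theorem weak_point_spec : Claim_equal_weak_point := by
  intro matrix _ hpre
  unfold Spec_weak_point
  exact weak_point_spec_aux matrix hpre
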